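-- pv_equiv track=rewrite | github.com/Suri-Feng/CodeITSuisse20 | codeitsuisse/routes/gmo.py | reconstructACGT
-- ===== SOURCE A (Python) =====
-- def reconstructACGT(A, C, G, T):
--     ans = 'ACGT'*C
--     A -= C
--     G -= C
--     T -= C
--     while (A > 0):
--         if A == 1:
--             ans += 'A'
--             A -= 1
--         else:
--             ans += 'A'
--             A -= 2
--         if T > 0:
--             ans += 'T'
--             T -= 1
--         elif G > 0:
--             ans += 'G'
--             G -= 1
--     while(T > 0):
--         ans += 'T'
--         T -= 1
--     while(G>0):
--         ans += "G"
--         G -= 1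
--     return ans
-- ===== SOURCE B (Python) =====
-- def reconstructACGT(A, C, G, T):
--     a2, g2, t2 = A - C, G - C, T - C
--     n = (a2 + 1) // 2 if a2 > 0 else 0
--     t = min(n, max(t2, 0))
--     g = min(n - t, max(g2, 0))
--     return ('ACGT' * C + 'AT' * t + 'AG' * g + 'A' * (n - t - g)
--             + 'T' * (max(t2, 0) - t) + 'G' * (max(g2, 0) - g))
-- ===== Notes on version B (the rewrite author's own statement) =====
-- stated objective: simpler
-- what changed: Replaces the character-by-character while loops with a closed-form count computation (ceil((A-C)/2) interleave iterations, T used before G) and builds the result by string multiplication.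
import Mathlib
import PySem

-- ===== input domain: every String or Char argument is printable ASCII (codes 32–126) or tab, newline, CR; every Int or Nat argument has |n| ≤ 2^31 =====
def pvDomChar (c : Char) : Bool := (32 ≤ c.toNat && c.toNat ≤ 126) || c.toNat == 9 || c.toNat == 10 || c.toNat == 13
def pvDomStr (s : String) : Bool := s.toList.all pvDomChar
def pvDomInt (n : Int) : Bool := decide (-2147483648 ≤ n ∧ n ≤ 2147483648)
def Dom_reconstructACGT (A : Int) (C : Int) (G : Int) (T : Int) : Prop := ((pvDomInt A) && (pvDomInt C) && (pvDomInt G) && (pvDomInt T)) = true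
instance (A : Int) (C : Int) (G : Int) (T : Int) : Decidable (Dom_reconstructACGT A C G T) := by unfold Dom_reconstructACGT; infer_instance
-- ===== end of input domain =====

-- B replaces A's character-by-character while loops with a closed-form count
-- computation and six string multiplications (objective: simpler).

-- ===== PORT A =====
-- termination facts for the while loops (cited by the ports' decreasing_by)
theorem pvDecA (A : Int) (hA : A > 0) : (if A = 1 then A - 1 else A - 2).toNat < A.toNat := by
  split <;> omega
theorem pvDecT (T : Int) (hT : T > 0) : (T - 1).toNat < T.toNat := by omega

-- the main 'while (A > 0)' loop: appends 'A' (consuming 1 if A == 1, else 2),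
-- then one 'T' if T > 0, else one 'G' if G > 0; returns (ans, G, T)
def pvLoopA (ans : List Char) (A : Int) (G : Int) (T : Int) : List Char × Int × Int :=
  if A > 0 then
    let ans := ans ++ ['A']
    let A' := if A = 1 then A - 1 else A - 2
    if T > 0 then pvLoopA (ans ++ ['T']) A' G (T - 1)
    else if G > 0 then pvLoopA (ans ++ ['G']) A' (G - 1) T
    else pvLoopA ans A' G T
  else (ans, G, T)
  termination_by A.toNat
  decreasing_by all_goals exact pvDecA A (by assumption)

-- 'while (T > 0): ans += "T"'
def pvLoopT (ans : List Char) (T : Int) : List Char :=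
  if T > 0 then pvLoopT (ans ++ ['T']) (T - 1) else ans
  termination_by T.toNat
  decreasing_by exact pvDecT T (by assumption)

-- 'while (G > 0): ans += "G"'
def pvLoopG (ans : List Char) (G : Int) : List Char :=
  if G > 0 then pvLoopG (ans ++ ['G']) (G - 1) else ans
  termination_by G.toNat
  decreasing_by exact pvDecT G (by assumption)

def reconstructACGT (A : Int) (C : Int) (G : Int) (T : Int) : String :=
  let ans := PySem.List.pyRepeat "ACGT".toList C
  let r := pvLoopA ans (A - C) (G - C) (T - C)
  String.ofList (pvLoopG (pvLoopT r.1 r.2.2) r.2.1)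

-- ===== PORT B =====
def reconstructACGT_alt (A : Int) (C : Int) (G : Int) (T : Int) : String :=
  let a2 := A - C
  let g2 := G - C
  let t2 := T - C
  let n := if a2 > 0 then PySem.Int.floordiv (a2 + 1) 2 else 0
  let t := min n (max t2 0)
  let g := min (n - t) (max g2 0)
  String.ofList (PySem.List.pyRepeat "ACGT".toList C ++ PySem.List.pyRepeat "AT".toList t
    ++ PySem.List.pyRepeat "AG".toList g ++ PySem.List.pyRepeat "A".toList (n - t - g)
    ++ PySem.List.pyRepeat "T".toList (max t2 0 - t) ++ PySem.List.pyRepeat "G".toList (max g2 0 - g))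

-- ===== PRECONDITION & SPEC =====
def Spec_reconstructACGT (A : Int) (C : Int) (G : Int) (T : Int) (out : String) : Prop := out = reconstructACGT_alt A C G T
instance (A : Int) (C : Int) (G : Int) (T : Int) (out : String) : Decidable (Spec_reconstructACGT A C G T out) := by unfold Spec_reconstructACGT; infer_instance

-- ===== CLAIM (what is proved, stated in full; the proofs are below) =====
def Claim_equal_reconstructACGT : Prop := ∀ (A : Int) (C : Int) (G : Int) (T : Int), Dom_reconstructACGT A C G T → Spec_reconstructACGT A C G T (reconstructACGT A C G T)

-- ===== LEMMAS AND PROOFS =====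

-- number of iterations of A's main loop
def pvN (A : Int) : Int := if A > 0 then PySem.Int.floordiv (A + 1) 2 else 0

theorem pvN_nonneg (A : Int) : 0 ≤ pvN A := by
  unfold pvN; split
  · rw [PySem.Int.floordiv, Int.fdiv_eq_ediv]; omega
  · omega

theorem pvN_nonpos (A : Int) (h : A ≤ 0) : pvN A = 0 := by
  unfold pvN; split <;> omega

theorem pvN_two_le (A : Int) (h : 2 ≤ A) : pvN A = pvN (A - 2) + 1 := by
  unfold pvN
  rw [PySem.Int.floordiv, PySem.Int.floordiv, Int.fdiv_eq_ediv, Int.fdiv_eq_ediv]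
  split <;> split <;> omega

theorem pyRepeat_zero {α : Type} (xs : List α) (n : Int) (h : n ≤ 0) :
    PySem.List.pyRepeat xs n = [] := by
  simp [PySem.List.pyRepeat, Int.toNat_of_nonpos h]

theorem pyRepeat_succ {α : Type} (xs : List α) (n : Int) (h : 0 ≤ n) :
    PySem.List.pyRepeat xs (n + 1) = xs ++ PySem.List.pyRepeat xs n := by
  simp only [PySem.List.pyRepeat]
  have : (n + 1).toNat = n.toNat + 1 := by omega
  rw [this, List.replicate_succ, List.flatten_cons]

theorem pyRepeat_congr {α : Type} (xs : List α) (m n : Int) (h : m.toNat = n.toNat) :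
    PySem.List.pyRepeat xs m = PySem.List.pyRepeat xs n := by
  simp [PySem.List.pyRepeat, h]

theorem pyRepeat_zero' {α : Type} (xs : List α) : PySem.List.pyRepeat xs (0 : Int) = [] := by
  simp [PySem.List.pyRepeat]

theorem pyRepeat_succ' {α : Type} (xs : List α) (n : Int) (h : 0 < n) :
    PySem.List.pyRepeat xs n = xs ++ PySem.List.pyRepeat xs (n - 1) := by
  have h2 : n - 1 + 1 = n := by omega
  rw [← h2, pyRepeat_succ xs (n - 1) (by omega)]
  rw [h2]

theorem toList_AT : "AT".toList = ['A', 'T'] := rfl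
theorem toList_AG : "AG".toList = ['A', 'G'] := rfl
theorem toList_A : "A".toList = ['A'] := rfl
theorem toList_T : "T".toList = ['T'] := rfl
theorem toList_G : "G".toList = ['G'] := rfl

-- closed form for the main loop
theorem pvLoopA_eq (ans : List Char) (A G T : Int) :
    pvLoopA ans A G T =
      (ans ++ PySem.List.pyRepeat "AT".toList (min (pvN A) (max T 0))
           ++ PySem.List.pyRepeat "AG".toList (min (pvN A - min (pvN A) (max T 0)) (max G 0))
           ++ PySem.List.pyRepeat "A".toList
                (pvN A - min (pvN A) (max T 0) - min (pvN A - min (pvN A) (max T 0)) (max G 0)),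
       G - min (pvN A - min (pvN A) (max T 0)) (max G 0),
       T - min (pvN A) (max T 0)) := by
  fun_induction pvLoopA ans A G T with
  | case1 ans A G T hA ansA A' hT ih =>
    have hA' : A' = if A = 1 then A - 1 else A - 2 := rfl
    have hN : pvN A = pvN A' + 1 := by
      rw [hA']
      by_cases h1 : A = 1
      · subst h1; rw [if_pos rfl]; decide
      · rw [if_neg h1]; exact pvN_two_le A (by omega)
    have hN' : 0 ≤ pvN A' := pvN_nonneg A'
    rw [ih, hN]
    rw [show min (pvN A' + 1) (max T 0) = min (pvN A') (max (T - 1) 0) + 1 from by omega]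
    rw [show pvN A' + 1 - (min (pvN A') (max (T - 1) 0) + 1) = pvN A' - min (pvN A') (max (T - 1) 0)
        from by omega]
    rw [show T - (min (pvN A') (max (T - 1) 0) + 1) = T - 1 - min (pvN A') (max (T - 1) 0)
        from by omega]
    rw [pyRepeat_succ' "AT".toList (min (pvN A') (max (T - 1) 0) + 1) (by omega)]
    rw [show min (pvN A') (max (T - 1) 0) + 1 - 1 = min (pvN A') (max (T - 1) 0) from by omega]
    rw [toList_AT, show ansA = ans ++ ['A'] from rfl]
    simp [List.append_assoc]
  | case2 ans A G T hA ansA A' hT hG ih =>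
    have hA' : A' = if A = 1 then A - 1 else A - 2 := rfl
    have hN : pvN A = pvN A' + 1 := by
      rw [hA']
      by_cases h1 : A = 1
      · subst h1; rw [if_pos rfl]; decide
      · rw [if_neg h1]; exact pvN_two_le A (by omega)
    have hN' : 0 ≤ pvN A' := pvN_nonneg A'
    rw [ih, hN]
    rw [show min (pvN A' + 1) (max T 0) = 0 from by omega]
    rw [show min (pvN A') (max T 0) = 0 from by omega]
    rw [show min (pvN A' + 1 - 0) (max G 0) = min (pvN A' - 0) (max (G - 1) 0) + 1 from by omega]
    rw [show pvN A' + 1 - 0 - (min (pvN A' - 0) (max (G - 1) 0) + 1)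
          = pvN A' - 0 - min (pvN A' - 0) (max (G - 1) 0) from by omega]
    rw [show G - (min (pvN A' - 0) (max (G - 1) 0) + 1) = G - 1 - min (pvN A' - 0) (max (G - 1) 0)
        from by omega]
    rw [pyRepeat_succ' "AG".toList (min (pvN A' - 0) (max (G - 1) 0) + 1) (by omega)]
    rw [show min (pvN A' - 0) (max (G - 1) 0) + 1 - 1 = min (pvN A' - 0) (max (G - 1) 0)
        from by omega]
    rw [toList_AG, show ansA = ans ++ ['A'] from rfl]
    simp [pyRepeat_zero', List.append_assoc]
  | case3 ans A G T hA ansA A' hT hG ih =>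
    have hA' : A' = if A = 1 then A - 1 else A - 2 := rfl
    have hN : pvN A = pvN A' + 1 := by
      rw [hA']
      by_cases h1 : A = 1
      · subst h1; rw [if_pos rfl]; decide
      · rw [if_neg h1]; exact pvN_two_le A (by omega)
    have hN' : 0 ≤ pvN A' := pvN_nonneg A'
    rw [ih, hN]
    rw [show min (pvN A' + 1) (max T 0) = 0 from by omega]
    rw [show min (pvN A') (max T 0) = 0 from by omega]
    rw [show min (pvN A' + 1 - 0) (max G 0) = 0 from by omega]
    rw [show min (pvN A' - 0) (max G 0) = 0 from by omega]
    rw [show pvN A' + 1 - 0 - 0 = (pvN A' - 0 - 0) + 1 from by omega]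
    rw [pyRepeat_succ' "A".toList (pvN A' - 0 - 0 + 1) (by omega)]
    rw [show pvN A' - 0 - 0 + 1 - 1 = pvN A' - 0 - 0 from by omega]
    rw [toList_A, show ansA = ans ++ ['A'] from rfl]
    simp [pyRepeat_zero', List.append_assoc]
  | case4 ans A G T hA =>
    rw [pvN_nonpos A (by omega)]
    rw [show min (0 : Int) (max T 0) = 0 from by omega]
    rw [show min ((0 : Int) - 0) (max G 0) = 0 from by omega]
    rw [show (0 : Int) - 0 - 0 = 0 from by omega]
    simp [pyRepeat_zero']

theorem pvLoopT_eq (ans : List Char) (T : Int) :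
    pvLoopT ans T = ans ++ PySem.List.pyRepeat "T".toList T := by
  fun_induction pvLoopT ans T with
  | case1 ans T hT ih =>
    rw [ih, pyRepeat_succ' "T".toList T (by omega), toList_T]
    simp [List.append_assoc]
  | case2 ans T hT =>
    rw [pyRepeat_zero "T".toList T (by omega)]
    simp

theorem pvLoopG_eq (ans : List Char) (G : Int) :
    pvLoopG ans G = ans ++ PySem.List.pyRepeat "G".toList G := by
  fun_induction pvLoopG ans G with
  | case1 ans G hG ih =>
    rw [ih, pyRepeat_succ' "G".toList G (by omega), toList_G]
    simp [List.append_assoc]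
  | case2 ans G hG =>
    rw [pyRepeat_zero "G".toList G (by omega)]
    simp

-- ===== VERDICT (by name: the statement is the Claim_ definition above) =====
theorem reconstructACGT_spec : Claim_equal_reconstructACGT := by
  intro A C G T _
  unfold Spec_reconstructACGT
  simp only [reconstructACGT, reconstructACGT_alt, pvLoopA_eq, pvLoopT_eq, pvLoopG_eq]
  have hpv : (if A - C > 0 then PySem.Int.floordiv (A - C + 1) 2 else 0) = pvN (A - C) := rfl
  rw [hpv]
  have hN0 : 0 ≤ pvN (A - C) := pvN_nonneg _
  have e1 : PySem.List.pyRepeat "T".toList (T - C - min (pvN (A - C)) (max (T - C) 0))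
          = PySem.List.pyRepeat "T".toList (max (T - C) 0 - min (pvN (A - C)) (max (T - C) 0)) :=
    pyRepeat_congr _ _ _ (by omega)
  have e2 : PySem.List.pyRepeat "G".toList
              (G - C - min (pvN (A - C) - min (pvN (A - C)) (max (T - C) 0)) (max (G - C) 0))
          = PySem.List.pyRepeat "G".toList
              (max (G - C) 0 - min (pvN (A - C) - min (pvN (A - C)) (max (T - C) 0)) (max (G - C) 0)) :=
    pyRepeat_congr _ _ _ (by omega)
  rw [e1, e2]
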